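-- pv_equiv track=rewrite | github.com/Clevin49958/codeforces | 1728E.py | build_dp
-- ===== SOURCE A (Python) =====
-- def build_dp(n, dishes):
--     dpa = [0]
--     dpb = [0] * 2
--     # black red
--     for i in range(1, n+1):
--         dpb[0] = dpa[0] + dishes[i-1][0]
--         dpb[-1] = dpa[-1] + dishes[i-1][1]
--         for x in range(1, i):
--             y = i-x
--             dpb[x] = max(dpa[x] + dishes[i-1][0], dpa[x-1] + dishes[i-1][1])
--             pass
--         dpa = dpb
--         dpb = [0] * (i + 2)
--     return dpa
-- ===== SOURCE B (Python) =====
-- def build_dp(n, dishes):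
--     # dp[x] = (sum of all c0 over the first n dishes) + sum of the x largest
--     # values of (c1 - c0): picking which x dishes take their c1 value is an
--     # unconstrained choice, so the greedy top-x deltas are optimal.
--     rows = dishes[:n] if n > 0 else []
--     base = sum(c0 for c0, c1 in rows)
--     deltas = sorted((c1 - c0 for c0, c1 in rows), reverse=True)
--     dp = [base]
--     for d in deltas:
--         dp.append(dp[-1] + d)
--     return dp
-- ===== Notes on version B (the rewrite author's own statement) =====
-- stated objective: faster
-- what changed: Replaces the O(n^2) row-by-row DP with a closed form: since choosing which x dishes take their second value is unconstrained, dp[x] = sum of all first components + sum of the x largest (c1-c0) deltas, computed by one sort and a prefix-sum scan.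
import Mathlib
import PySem

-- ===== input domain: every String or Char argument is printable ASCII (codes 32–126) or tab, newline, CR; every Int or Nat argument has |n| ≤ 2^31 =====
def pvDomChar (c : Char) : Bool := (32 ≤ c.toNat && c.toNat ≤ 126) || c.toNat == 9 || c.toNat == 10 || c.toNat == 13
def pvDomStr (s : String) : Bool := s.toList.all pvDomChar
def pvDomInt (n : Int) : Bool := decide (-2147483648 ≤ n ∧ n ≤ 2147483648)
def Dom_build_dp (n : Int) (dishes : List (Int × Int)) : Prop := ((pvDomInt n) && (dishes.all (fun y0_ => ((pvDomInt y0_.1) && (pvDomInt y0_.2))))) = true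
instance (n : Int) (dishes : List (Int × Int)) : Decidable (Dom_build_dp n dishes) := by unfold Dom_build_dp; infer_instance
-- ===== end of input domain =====

-- B replaces A's O(n^2) row-by-row DP with a sort-based closed form (top-x deltas
-- as prefix sums); proved equal on Pre_ (n <= len(dishes), where A does not raise).


-- ===== PORT A =====
-- one iteration of A's outer loop; state = (dpa, dpb).
-- dishes[i-1] is in range under Pre_; the .getD (0,0) default is never used there.
def pvStepA (dishes : List (Int × Int)) (s : List Int × List Int) (i : Int) : List Int × List Int :=
  let dpa := s.1
  let d := (PySem.List.pyGet? dishes (i - 1)).getD (0, 0)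
  -- dpb[0] = dpa[0] + dishes[i-1][0]  (dpa is never empty, so the getD default is dead)
  let dpb := PySem.List.pySetD s.2 0 (PySem.List.pyGetD dpa 0 0 + d.1)
  -- dpb[-1] = dpa[-1] + dishes[i-1][1]
  let dpb := PySem.List.pySetD dpb (-1) (PySem.List.pyGetD dpa (-1) 0 + d.2)
  -- for x in range(1, i): dpb[x] = max(dpa[x] + …[0], dpa[x-1] + …[1])   (y = i-x is unused)
  let dpb := (PySem.List.pyRange 1 i 1).foldl
    (fun b x => PySem.List.pySetD b x
      (max (PySem.List.pyGetD dpa x 0 + d.1) (PySem.List.pyGetD dpa (x - 1) 0 + d.2))) dpb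
  -- dpa = dpb; dpb = [0] * (i + 2)
  (dpb, PySem.List.pyRepeat [0] (i + 2))

def build_dp (n : Int) (dishes : List (Int × Int)) : List Int :=
  -- dpa = [0]; dpb = [0] * 2; for i in range(1, n+1): …; return dpa
  ((PySem.List.pyRange 1 (n + 1) 1).foldl (pvStepA dishes) ([0], PySem.List.pyRepeat [0] 2)).1

-- ===== PORT B =====
def build_dp_alt (n : Int) (dishes : List (Int × Int)) : List Int :=
  -- rows = dishes[:n] if n > 0 else []
  let rows := if 0 < n then PySem.List.slice dishes none (some n) else []
  -- base = sum(c0 for c0, c1 in rows)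
  let base := rows.foldl (fun s p => s + p.1) 0
  -- deltas = sorted((c1 - c0 for c0, c1 in rows), reverse=True)
  let deltas := PySem.List.sorted (rows.map (fun p => p.2 - p.1)) (fun x => x) true
  -- dp = [base]; for d in deltas: dp.append(dp[-1] + d)
  deltas.foldl (fun dp d => dp ++ [PySem.List.pyGetD dp (-1) 0 + d]) [base]

-- ===== PRECONDITION & SPEC =====
-- A raises IndexError on dishes[i-1] when n > len(dishes); exactly those inputs are excluded.
def Pre_build_dp (n : Int) (dishes : List (Int × Int)) : Prop := n ≤ (dishes.length : Int)
instance (n : Int) (dishes : List (Int × Int)) : Decidable (Pre_build_dp n dishes) := by unfold Pre_build_dp; infer_instance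
def pvWitness_build_dp : Int × (List (Int × Int)) := (2, [(3, 1), (-2, 5)])

def Spec_build_dp (n : Int) (dishes : List (Int × Int)) (out : List Int) : Prop := out = build_dp_alt n dishes
instance (n : Int) (dishes : List (Int × Int)) (out : List Int) : Decidable (Spec_build_dp n dishes out) := by unfold Spec_build_dp; infer_instance

-- ===== CLAIM (what is proved, stated in full; the proofs are below) =====
def Claim_equal_build_dp : Prop := ∀ (n : Int) (dishes : List (Int × Int)), Dom_build_dp n dishes → Pre_build_dp n dishes → Spec_build_dp n dishes (build_dp n dishes)

-- ===== LEMMAS AND PROOFS =====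

-- the reference row: prefix sums of a delta list on top of a base value
def pvRow (b : Int) (L : List Int) : List Int :=
  (List.range (L.length + 1)).map (fun x => b + (L.take x).sum)

-- descending insertion (stable), and the left-fold insertion sort it induces
def pvIns (d : Int) : List Int → List Int
  | [] => [d]
  | a :: l => if d ≤ a then a :: pvIns d l else d :: a :: l

def pvSortD (L : List Int) : List Int := L.foldl (fun acc x => pvIns x acc) []

-- A-side row-rebuilding helper (the elementwise meaning of pvStepA's writes)
def pvZipStep (dishes : List (Int × Int)) (dp : List Int) (i : Int) : List Int :=
  let d := (PySem.List.pyGet? dishes i).getD (0, 0)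
  (PySem.List.pyGetD dp 0 0 + d.1) ::
    (((PySem.List.slice dp (some 1) none).zip dp).map (fun p => max (p.1 + d.1) (p.2 + d.2))
      ++ [PySem.List.pyGetD dp (-1) 0 + d.2])

lemma pv_pySetD_neg_one (xs : List Int) (v : Int) (h : xs ≠ []) :
    PySem.List.pySetD xs (-1) v = xs.set (xs.length - 1) v := by
  have hl : 0 < xs.length := List.length_pos_iff.2 h
  simp [PySem.List.pySetD, PySem.List.pySet?, PySem.List.pyIdx?]
  split_ifs with h1 <;> simp_all

lemma pv_length_foldl_set (f : Int → Int) (L : List Int) (b : List Int) :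
    (L.foldl (fun b x => PySem.List.pySetD b x (f x)) b).length = b.length := by
  induction L generalizing b with
  | nil => rfl
  | cons x L ih => simp [List.foldl_cons, ih, PySem.List.length_pySetD]

lemma pv_getD_foldl_set (f : Int → Int) (L : List Int) (b : List Int) (j : Nat)
    (hL : ∀ x ∈ L, 0 ≤ x ∧ x < (b.length : Int)) :
    (L.foldl (fun b x => PySem.List.pySetD b x (f x)) b).getD j 0 =
      if (j : Int) ∈ L then f j else b.getD j 0 := by
  induction L generalizing b with
  | nil => simp
  | cons x L ih =>
    have hx := hL x (by simp)
    have hxl : x.toNat < b.length := by omega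
    rw [List.foldl_cons, PySem.List.pySetD_of_nonneg _ _ hx.1,
      ih _ (by intro y hy; have := hL y (by simp [hy]); simpa using this)]
    by_cases hjL : (j : Int) ∈ L
    · simp [hjL]
    · by_cases hjx : (j : Int) = x
      · have : x.toNat = j := by omega
        have hj : j < b.length := by omega
        simp [hjL, hjx.symm, List.getD_eq_getElem?_getD, List.getElem?_set_self hj]
      · have : x.toNat ≠ j := by omega
        simp [hjL, hjx, List.getD_eq_getElem?_getD, List.getElem?_set_ne this]

-- pvStepA's first component is pvZipStep of the previous row
lemma pv_stepA_zip (dishes : List (Int × Int)) (dpa dpb : List Int) (m : Nat)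
    (ha : dpa.length = m + 1) (hb : dpb.length = m + 2) :
    (pvStepA dishes (dpa, dpb) ((m : Int) + 1)).1 = pvZipStep dishes dpa (m : Int) ∧
    (pvStepA dishes (dpa, dpb) ((m : Int) + 1)).2.length = m + 3 := by
  have hidx : (m : Int) + 1 - 1 = (m : Int) := by ring
  constructor
  · simp only [pvStepA, pvZipStep, hidx]
    set d := (PySem.List.pyGet? dishes (m : Int)).getD (0, 0) with hd
    set v0 := PySem.List.pyGetD dpa 0 0 + d.1 with hv0
    set v1 := PySem.List.pyGetD dpa (-1) 0 + d.2 with hv1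
    have e0 : PySem.List.pySetD dpb 0 v0 = dpb.set 0 v0 := by
      rw [PySem.List.pySetD_of_nonneg dpb v0 (by norm_num)]
      norm_num
    rw [e0]
    have hb1 : dpb.set 0 v0 ≠ [] := by
      intro hh
      have : (dpb.set 0 v0).length = 0 := by rw [hh]; rfl
      simp [hb] at this
    rw [pv_pySetD_neg_one _ _ hb1]
    have hsetlen : (dpb.set 0 v0).length - 1 = m + 1 := by simp [hb]
    rw [hsetlen]
    have hmid : (((PySem.List.slice dpa (some 1) none).zip dpa).map
        (fun p => max (p.1 + d.1) (p.2 + d.2))).length = m := by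
      simp [PySem.List.slice_from_one, ha]
    apply List.ext_getElem
    · rw [pv_length_foldl_set]
      simp [hb, hmid]
    intro j hj1 hj2
    rw [pv_length_foldl_set] at hj1
    simp only [List.length_set, hb] at hj1
    have hL : ∀ x ∈ PySem.List.pyRange 1 ((m : Int) + 1) 1,
        0 ≤ x ∧ x < (((dpb.set 0 v0).set (m + 1) v1).length : Int) := by
      intro x hx
      rw [PySem.List.mem_pyRange_one] at hx
      simp only [List.length_set, hb]
      exact ⟨by omega, by push_cast; omega⟩
    rw [← List.getD_eq_getElem _ 0,
      pv_getD_foldl_set (fun x => max (PySem.List.pyGetD dpa x 0 + d.1) (PySem.List.pyGetD dpa (x - 1) 0 + d.2))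
        _ _ j hL]
    by_cases hj0 : j = 0
    · subst hj0
      rw [if_neg (by simp [PySem.List.mem_pyRange_one])]
      have hlt0 : (0 : Nat) < dpb.length := by omega
      simp [List.getD_eq_getElem?_getD, List.getElem?_set_ne (by omega : m + 1 ≠ 0),
        List.getElem?_set_self hlt0]
    by_cases hjm : j = m + 1
    · subst hjm
      rw [if_neg (by rw [PySem.List.mem_pyRange_one]; omega)]
      have hlt : m + 1 < (dpb.set 0 v0).length := by simp [hb]
      simp only [List.getD_eq_getElem?_getD, List.getElem?_set_self hlt, Option.getD_some]
      rw [List.getElem_cons]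
      rw [dif_neg (by omega)]
      rw [List.getElem_append_right (by omega)]
      simp [hmid]
    · -- interior cell: 1 ≤ j ≤ m
      rw [if_pos (by rw [PySem.List.mem_pyRange_one]; omega)]
      obtain ⟨jj, rfl⟩ : ∃ jj, j = jj + 1 := ⟨j - 1, by omega⟩
      have hjjm : jj < m := by omega
      have e1 : PySem.List.pyGetD dpa ((jj + 1 : Nat) : Int) 0 = dpa[jj + 1] := by
        rw [PySem.List.pyGetD_natCast, List.getD_eq_getElem _ _ (by omega)]
      have e2 : PySem.List.pyGetD dpa (((jj + 1 : Nat) : Int) - 1) 0 = dpa[jj] := by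
        have hc : ((jj + 1 : Nat) : Int) - 1 = ((jj : Nat) : Int) := by push_cast; ring
        rw [hc, PySem.List.pyGetD_natCast, List.getD_eq_getElem _ _ (by omega)]
      rw [e1, e2, List.getElem_cons, dif_neg (by omega),
        List.getElem_append_left (by omega)]
      rw [List.getElem_map, List.getElem_zip]
      simp [PySem.List.slice_from_one, List.getElem_tail]
  · simp [pvStepA, PySem.List.pyRepeat_singleton]
    omega

-- basic facts about pvIns
lemma pv_ins_perm (d : Int) (L : List Int) : (pvIns d L).Perm (d :: L) := by
  induction L with
  | nil => simp [pvIns]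
  | cons a l ih =>
    unfold pvIns
    split_ifs
    · exact ((ih.cons a).trans (List.Perm.swap d a l))
    · exact List.Perm.refl _

lemma pv_ins_sum (d : Int) (L : List Int) : (pvIns d L).sum = d + L.sum :=
  by simpa using (pv_ins_perm d L).sum_eq

lemma pv_ins_length (d : Int) (L : List Int) : (pvIns d L).length = L.length + 1 :=
  by simpa using (pv_ins_perm d L).length_eq

lemma pv_ins_sorted (d : Int) (L : List Int) (h : L.Pairwise (· ≥ ·)) :
    (pvIns d L).Pairwise (· ≥ ·) := by
  induction L with
  | nil => simp [pvIns]
  | cons a l ih =>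
    rcases List.pairwise_cons.1 h with ⟨ha, hl⟩
    unfold pvIns
    split_ifs with hda
    · refine List.pairwise_cons.2 ⟨?_, ih hl⟩
      intro y hy
      rcases List.mem_cons.1 (((pv_ins_perm d l).mem_iff).1 hy) with rfl | h1
      · omega
      · exact ha y h1
    · refine List.pairwise_cons.2 ⟨?_, h⟩
      intro y hy
      rcases List.mem_cons.1 hy with rfl | h1
      · omega
      · have := ha y h1; omega

-- prefix-sum of take (k+1)
lemma pv_sum_take_succ (L : List Int) (k : Nat) (hk : k < L.length) :
    (L.take (k + 1)).sum = (L.take k).sum + L[k] :=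
  List.sum_take_succ L k hk

-- the core exchange lemma: inserting d into a descending list, the x-prefix sum
-- is the max of "skip d" and "take d instead of the x-th element"
lemma pv_topsum_ins (d : Int) (L : List Int) (h : L.Pairwise (· ≥ ·)) (k : Nat)
    (hk : k < L.length) :
    ((pvIns d L).take (k + 1)).sum = max ((L.take (k + 1)).sum) ((L.take k).sum + d) := by
  induction L generalizing k with
  | nil => simp at hk
  | cons a l ih =>
    rcases List.pairwise_cons.1 h with ⟨ha, hl⟩
    unfold pvIns
    split_ifs with hda
    · -- d ≤ a : insert into the tail
      cases k with
      | zero =>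
        simp
        omega
      | succ j =>
        have hj : j < l.length := by simpa using hk
        have := ih hl j hj
        simp only [List.take_succ_cons, List.sum_cons, this]
        omega
    · -- a < d : d goes in front
      have hget : (a :: l)[k] ≤ a := by
        cases k with
        | zero => simp
        | succ j =>
          have hj : j < l.length := by simpa using hk
          simpa using ha l[j] (List.getElem_mem hj)
      have hsucc := pv_sum_take_succ (a :: l) k hk
      simp only [List.take_succ_cons, List.sum_cons] at hsucc ⊢
      omega

-- pvSortD over a snoc is pvIns into pvSortD
lemma pv_sortD_snoc (L : List Int) (d : Int) : pvSortD (L ++ [d]) = pvIns d (pvSortD L) := by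
  simp [pvSortD, List.foldl_append]

lemma pv_sortD_perm (L : List Int) : (pvSortD L).Perm L := by
  induction L using List.reverseRecOn with
  | nil => simp [pvSortD]
  | append_singleton l d ih =>
    rw [pv_sortD_snoc]
    exact ((pv_ins_perm d (pvSortD l)).trans (ih.cons d)).trans
      (List.perm_append_singleton d l).symm

lemma pv_sortD_sorted (L : List Int) : (pvSortD L).Pairwise (· ≥ ·) := by
  induction L using List.reverseRecOn with
  | nil => simp [pvSortD]
  | append_singleton l d ih => rw [pv_sortD_snoc]; exact pv_ins_sorted d _ ih

-- B's sort equals pvSortD (both descending rearrangements of the same list)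
lemma pv_sorted_eq_sortD (L : List Int) :
    PySem.List.sorted L (fun x => x) true = pvSortD L := by
  have h1 : (PySem.List.sorted L (fun x => x) true).Pairwise (· ≥ ·) := by
    have := PySem.List.sorted_pairwise_rev (xs := L) (key := fun x => x)
    exact this.imp (fun h => h)
  have h2 : (pvSortD L).Pairwise (· ≥ ·) := pv_sortD_sorted L
  have hp : (PySem.List.sorted L (fun x => x) true).Perm (pvSortD L) :=
    (PySem.List.sorted_perm _ _ _).trans (pv_sortD_perm L).symm
  exact @List.Perm.eq_of_pairwise' _ _ ⟨fun a b hab hba => le_antisymm hba hab⟩ _ _ h1 h2 hp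

-- elements of pvRow
lemma pv_row_length (b : Int) (L : List Int) : (pvRow b L).length = L.length + 1 := by
  simp [pvRow]

lemma pv_row_getElem (b : Int) (L : List Int) (j : Nat) (hj : j < (pvRow b L).length) :
    (pvRow b L)[j] = b + (L.take j).sum := by
  simp [pvRow]

lemma pv_row_ne_nil (b : Int) (L : List Int) : pvRow b L ≠ [] := by
  intro h
  have := pv_row_length b L
  rw [h] at this
  simp at this

lemma pv_row_last (b : Int) (L : List Int) :
    PySem.List.pyGetD (pvRow b L) (-1) 0 = b + L.sum := by
  rw [PySem.List.pyGetD_neg_one (pvRow b L) 0 (pv_row_ne_nil b L),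
    List.getLast_eq_getElem, pv_row_getElem _ _ _ (by simp [pv_row_length])]
  simp [pv_row_length]

-- pvZipStep turns pvRow b L into pvRow (b + c0) (pvIns (c1 - c0) L)
lemma pv_zipStep_row (dishes : List (Int × Int)) (b : Int) (L : List Int)
    (h : L.Pairwise (· ≥ ·)) (m : Nat) (hm : L.length = m) (c0 c1 : Int)
    (hdish : (PySem.List.pyGet? dishes ((m : Nat) : Int)).getD (0, 0) = (c0, c1)) :
    pvZipStep dishes (pvRow b L) ((m : Nat) : Int) = pvRow (b + c0) (pvIns (c1 - c0) L) := by
  have hlen : (pvRow b L).length = m + 1 := by rw [pv_row_length, hm]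
  have hmid : (((PySem.List.slice (pvRow b L) (some 1) none).zip (pvRow b L)).map
      (fun p => max (p.1 + c0) (p.2 + c1))).length = m := by
    simp [PySem.List.slice_from_one, hlen]
  have hinslen : (pvIns (c1 - c0) L).length = m + 1 := by rw [pv_ins_length, hm]
  apply List.ext_getElem
  · simp only [pvZipStep, hdish]
    rw [List.length_cons, List.length_append, hmid, pv_row_length, hinslen]
    simp
  intro j hj1 hj2
  rw [pv_row_getElem _ _ _ hj2]
  have hj : j < m + 2 := by rw [pv_row_length, hinslen] at hj2; omega
  simp only [pvZipStep, hdish]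
  rcases Nat.eq_zero_or_pos j with rfl | hj0
  · -- j = 0
    simp only [List.getElem_cons_zero]
    have h0 : PySem.List.pyGetD (pvRow b L) 0 0 = b := by
      rw [PySem.List.pyGetD_zero, List.getD_eq_getElem _ _ (by omega),
        pv_row_getElem _ _ _ (by omega)]
      simp
    rw [h0]; simp
  obtain ⟨jj, rfl⟩ : ∃ jj, j = jj + 1 := ⟨j - 1, by omega⟩
  rw [List.getElem_cons, dif_neg (by omega)]
  simp only [Nat.add_sub_cancel]
  by_cases hjm : jj = m
  · -- top cell
    subst hjm
    rw [List.getElem_append_right (by omega)]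
    simp only [hmid, Nat.sub_self, List.getElem_singleton]
    rw [pv_row_last]
    have hfull : (pvIns (c1 - c0) L).take (jj + 1) = pvIns (c1 - c0) L :=
      List.take_of_length_le (by omega)
    rw [hfull, pv_ins_sum]
    omega
  · -- interior cell: 1 ≤ jj+1 ≤ m
    have hjjm : jj < m := by omega
    rw [List.getElem_append_left (by omega), List.getElem_map, List.getElem_zip]
    have ht : (PySem.List.slice (pvRow b L) (some 1) none) = (pvRow b L).tail :=
      PySem.List.slice_from_one _
    simp only [ht, List.getElem_tail]
    rw [pv_row_getElem _ _ _ (by omega), pv_row_getElem _ _ _ (by omega)]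
    rw [pv_topsum_ins (c1 - c0) L h jj (by omega)]
    omega

-- the A-side invariant: after m outer iterations dpa is pvRow of the sorted deltas
lemma pv_mainA (dishes : List (Int × Int)) (m : Nat) (hm : m ≤ dishes.length) :
    ((PySem.List.pyRange 1 ((m : Int) + 1) 1).foldl (pvStepA dishes) ([0], PySem.List.pyRepeat [0] 2)).1
      = pvRow (((dishes.take m).map Prod.fst).sum)
          (pvSortD ((dishes.take m).map (fun p => p.2 - p.1))) ∧
    ((PySem.List.pyRange 1 ((m : Int) + 1) 1).foldl (pvStepA dishes) ([0], PySem.List.pyRepeat [0] 2)).2.length = m + 2 := by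
  induction m with
  | zero =>
    rw [PySem.List.pyRange_one_eq_nil (by omega)]
    exact ⟨rfl, rfl⟩
  | succ k ih =>
    have hk : k ≤ dishes.length := by omega
    have hklen : k < dishes.length := by omega
    obtain ⟨ihe, ih2⟩ := ih hk
    have h1 : ((k + 1 : Nat) : Int) + 1 = ((k : Int) + 1) + 1 := by push_cast; ring
    rw [h1, PySem.List.pyRange_one_succ_right (a := 1) (b := (k : Int) + 1) (by omega),
      List.foldl_append]
    simp only [List.foldl_cons, List.foldl_nil]
    set sA := (PySem.List.pyRange 1 ((k : Int) + 1) 1).foldl (pvStepA dishes)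
      ([0], PySem.List.pyRepeat [0] 2) with hsA
    set L := pvSortD ((dishes.take k).map (fun p => p.2 - p.1)) with hL
    set b := ((dishes.take k).map Prod.fst).sum with hb
    have hLlen : L.length = k := by
      rw [hL, (pv_sortD_perm _).length_eq, List.length_map, List.length_take]
      omega
    have ha : sA.1.length = k + 1 := by rw [ihe, pv_row_length, hLlen]
    have hstep := pv_stepA_zip dishes sA.1 sA.2 k ha ih2
    rw [Prod.mk.eta] at hstep
    have hget : PySem.List.pyGet? dishes ((k : Nat) : Int) = some dishes[k] := by
      rw [PySem.List.pyGet?_natCast, List.getElem?_eq_getElem hklen]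
    have hdish : (PySem.List.pyGet? dishes ((k : Nat) : Int)).getD (0, 0)
        = (dishes[k].1, dishes[k].2) := by rw [hget]; rfl
    have htake : dishes.take (k + 1) = dishes.take k ++ [dishes[k]] := by
      rw [List.take_add_one, List.getElem?_eq_getElem hklen]
      rfl
    constructor
    · rw [hstep.1, ihe,
        pv_zipStep_row dishes b L (hL ▸ pv_sortD_sorted _) k hLlen dishes[k].1 dishes[k].2 hdish,
        htake]
      congr 1
      · rw [List.map_append, List.sum_append, hb]
        simp
      · rw [List.map_append,
          show (List.map (fun p : Int × Int => p.2 - p.1) [dishes[k]]) = [dishes[k].2 - dishes[k].1] from rfl,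
          pv_sortD_snoc, hL]
    · rw [hstep.2]

-- B's append loop builds pvRow
lemma pv_mainB (L : List Int) (b : Int) :
    L.foldl (fun dp d => dp ++ [PySem.List.pyGetD dp (-1) 0 + d]) [b] = pvRow b L := by
  induction L using List.reverseRecOn with
  | nil => simp [pvRow]
  | append_singleton l d ih =>
    rw [List.foldl_append, List.foldl_cons, List.foldl_nil, ih, pv_row_last]
    apply List.ext_getElem
    · simp [pv_row_length]
    intro j hj1 hj2
    have hj2' : j < l.length + 2 := by
      rw [pv_row_length] at hj2
      simp only [List.length_append, List.length_singleton] at hj2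
      omega
    rw [pv_row_getElem _ _ _ hj2]
    by_cases hjl : j < l.length + 1
    · rw [List.getElem_append_left (by rw [pv_row_length]; omega),
        pv_row_getElem _ _ _ (by rw [pv_row_length]; omega),
        List.take_append_of_le_length (by omega)]
    · have hje : j = l.length + 1 := by omega
      subst hje
      rw [List.getElem_append_right (by rw [pv_row_length]),
        List.take_of_length_le (by simp)]
      simp [pv_row_length]
      omega
lemma pv_base_foldl (rows : List (Int × Int)) (s : Int) :
    rows.foldl (fun s p => s + p.1) s = s + (rows.map Prod.fst).sum := by
  induction rows generalizing s with
  | nil => simp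
  | cons r rows ih => simp [List.foldl_cons, ih]; ring

-- ===== VERDICT (by name: the statement is the Claim_ definition above) =====
theorem build_dp_spec : Claim_equal_build_dp := by
  intro n dishes _ hpre
  unfold Spec_build_dp build_dp build_dp_alt
  by_cases hn : n ≤ 0
  · rw [PySem.List.pyRange_one_eq_nil (by omega), if_neg (by omega)]
    rfl
  · have hpos : 0 < n := by omega
    have hmlen : n.toNat ≤ dishes.length := by unfold Pre_build_dp at hpre; omega
    have hm : n = ((n.toNat : Int)) := by omega
    rw [hm, if_pos (by omega : (0 : Int) < ((n.toNat : Int)))]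
    rw [PySem.List.slice_to_natCast, (pv_mainA dishes n.toNat hmlen).1]
    show pvRow _ _ =
      List.foldl (fun dp d => dp ++ [PySem.List.pyGetD dp (-1) 0 + d])
        [List.foldl (fun s p => s + p.1) 0 (List.take n.toNat dishes)]
        (PySem.List.sorted (List.map (fun p => p.2 - p.1) (List.take n.toNat dishes)) (fun x => x) true)
    rw [pv_sorted_eq_sortD, pv_mainB, pv_base_foldl]
    simp
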